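-- pv_equiv track=rewrite | github.com/AlgorithmReview-Organization-2/CodingReviewRepository | Coding_231227 Array_And_Hashing_And_Stack/주제무/주제무/2.py | solution
-- ===== SOURCE A (Python) =====
-- def solution(id_list, report, k):
--     answer = []
--
--     rep_docs = {id: set() for id in id_list}
--     acc_rep = {id: 0 for id in id_list}
--
--     for rep in report:
--         sender, receiver = rep.split()
--         if receiver not in rep_docs[sender]:
--             acc_rep[receiver] += 1
--             rep_docs[sender].add(receiver)
--
--     for id, acc in acc_rep.items():
--         if acc < k:
--             acc_rep[id] = False
--
--     for id in id_list:
--         s = 0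
--         for receiver in rep_docs[id]:
--             if acc_rep[receiver]:
--                 s += 1
--         answer.append(s)
--     return answer
-- ===== SOURCE B (Python) =====
-- def solution(id_list, report, k):
--     # Group-extraction scan: dedup reports into an ordered pair list, then repeatedly
--     # pull out one receiver's whole group; a group of size >= k credits each of its senders.
--     # No per-sender sets, no received-count dict, no banned set.
--     pairs = []
--     for rep in report:
--         sender, receiver = rep.split()
--         if (sender, receiver) not in pairs:
--             pairs.append((sender, receiver))
--     answer = {i: 0 for i in id_list}
--     while pairs:
--         receiver = pairs[0][1]
--         run = [p for p in pairs if p[1] == receiver]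
--         pairs = [p for p in pairs if p[1] != receiver]
--         if len(run) >= k:
--             for sender, _ in run:
--                 answer[sender] += 1
--     return [answer[i] for i in id_list]
-- ===== Notes on version B (the rewrite author's own statement) =====
-- stated objective: alternative
-- what changed: Replaces A's per-sender set-of-reportees dict, received-count dict, threshold pass and nested user x reportee counting loop by a group-extraction scan: dedup reports into one ordered pair list, then repeatedly pull out all pairs of the front receiver as a group and, if the group has >= k senders, credit each sender of the group.
import Mathlib
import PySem

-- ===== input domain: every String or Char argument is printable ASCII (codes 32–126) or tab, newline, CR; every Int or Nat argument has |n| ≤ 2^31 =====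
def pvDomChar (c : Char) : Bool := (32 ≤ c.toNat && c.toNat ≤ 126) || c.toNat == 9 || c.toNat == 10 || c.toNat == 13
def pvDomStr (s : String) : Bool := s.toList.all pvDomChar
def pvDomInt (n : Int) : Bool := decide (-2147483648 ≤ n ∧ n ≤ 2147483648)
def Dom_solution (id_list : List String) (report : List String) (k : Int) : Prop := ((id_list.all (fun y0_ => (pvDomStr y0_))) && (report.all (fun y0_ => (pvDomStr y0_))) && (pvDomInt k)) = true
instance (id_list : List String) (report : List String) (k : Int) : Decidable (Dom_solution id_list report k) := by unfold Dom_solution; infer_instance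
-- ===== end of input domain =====

-- B replaces A's per-sender set-of-reportees dict, received-count dict, threshold pass and
-- nested user×reportee counting loop by a group-extraction scan over the deduplicated pair
-- list: repeatedly pull out all pairs of the front receiver; a group of ≥ k pairs credits
-- each of its senders (objective: alternative).

-- `sender, receiver = rep.split()` (ValueError unless exactly 2 tokens — excluded by Pre_; both
-- Pythons contain this line verbatim, so both ports share this helper)
def pySplit2 (rep : String) : Option (String × String) :=
  match PySem.Str.split₀ rep with
  | [s, r] => some (s, r)
  | _ => none

-- ===== PORT A =====
-- {id: set() for id in id_list} / {id: 0 for id in id_list}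
def solutionInitDocs (id_list : List String) : PySem.Dict String (PySem.Set String) :=
  id_list.foldl (fun d id => d.insert id PySem.Set.empty) PySem.Dict.empty
def solutionInitAcc (id_list : List String) : PySem.Dict String Int :=
  id_list.foldl (fun d id => d.insert id (0 : Int)) PySem.Dict.empty

-- Python stores False into acc_rep and later only tests truthiness; False is modelled as 0
-- (falsy, like the int 0). rep_docs[sender] / acc_rep[receiver] raise KeyError on missing keys;
-- Pre_ guarantees the keys exist, so the getD defaults below are never consulted on Pre_.
def solution (id_list : List String) (report : List String) (k : Int) : List Int :=
  let st := report.foldl (fun st rep =>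
      match pySplit2 rep with
      | some (sender, receiver) =>
        if (st.1.getD sender PySem.Set.empty).contains receiver then st
        else (st.1.insert sender (PySem.Set.add (st.1.getD sender PySem.Set.empty) receiver),
              st.2.modify receiver 0 (· + 1))
      | none => st)
    (solutionInitDocs id_list, solutionInitAcc id_list)
  let acc := st.2.items.foldl (fun d p => if p.2 < k then d.insert p.1 (0 : Int) else d) st.2
  id_list.foldl (fun answer id =>
      answer ++ [(st.1.getD id PySem.Set.empty).foldl
        (fun s receiver => if acc.getD receiver 0 ≠ 0 then s + 1 else s) (0 : Int)]) []

-- ===== PORT B =====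
-- the while loop: pop the whole group of the front receiver; a group of ≥ k pairs credits each
-- of its senders (answer[sender] += 1 → modify with default 0; Pre_ guarantees the key exists)
def solutionAltLoop (k : Int) : List (String × String) → PySem.Dict String Int → PySem.Dict String Int
  | [], answer => answer
  | p :: rest, answer =>
    -- run = [q for q in pairs if q[1] == receiver]; pairs' = [q for q in pairs if q[1] != receiver]
    solutionAltLoop k ((p :: rest).filter (fun q => q.2 != p.2))
      (if k ≤ (((p :: rest).filter (fun q => q.2 == p.2)).length : Int) then
        ((p :: rest).filter (fun q => q.2 == p.2)).foldl (fun d q => d.modify q.1 0 (· + 1)) answer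
       else answer)
termination_by S _ => S.length
decreasing_by
  simp only [List.filter_cons, bne_self_eq_false, Bool.false_eq_true, if_false]
  exact Nat.lt_succ_of_le (List.length_filter_le _ _)

def solution_alt (id_list : List String) (report : List String) (k : Int) : List Int :=
  let pairs := report.foldl (fun ps rep =>
      match pySplit2 rep with
      | some p => if p ∈ ps then ps else ps ++ [p]
      | none => ps) []
  let answer := solutionAltLoop k pairs
      (id_list.foldl (fun d i => d.insert i (0 : Int)) PySem.Dict.empty)
  id_list.map (fun i => answer.getD i 0)

-- ===== PRECONDITION & SPEC =====
-- Pre_ = exactly the inputs where Python A returns: every report splits into exactly two tokens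
-- (else ValueError) and both tokens are in id_list (else KeyError).
def Pre_solution (id_list : List String) (report : List String) (_k : Int) : Prop :=
  ∀ rep ∈ report, (PySem.Str.split₀ rep).length = 2 ∧ ∀ x ∈ PySem.Str.split₀ rep, x ∈ id_list
instance (id_list : List String) (report : List String) (k : Int) : Decidable (Pre_solution id_list report k) := by unfold Pre_solution; infer_instance
def pvWitness_solution : List String × List String × Int := (["muzi", "frodo", "apeach"], ["muzi frodo", "apeach frodo", "muzi frodo"], 2)

def Spec_solution (id_list : List String) (report : List String) (k : Int) (out : List Int) : Prop := out = solution_alt id_list report k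
instance (id_list : List String) (report : List String) (k : Int) (out : List Int) : Decidable (Spec_solution id_list report k out) := by unfold Spec_solution; infer_instance

-- ===== CLAIM (what is proved, stated in full; the proofs are below) =====
def Claim_equal_solution : Prop := ∀ (id_list : List String) (report : List String) (k : Int), Dom_solution id_list report k → Pre_solution id_list report k → Spec_solution id_list report k (solution id_list report k)


-- ===== LEMMAS AND PROOFS =====

-- a fold inserting a constant value keeps getD at that constant
theorem pvGetDInitConst {ν : Type} (c : ν) : ∀ (l : List String) (d : PySem.Dict String ν) (x : String),
    d.getD x c = c → (l.foldl (fun d i => d.insert i c) d).getD x c = c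
  | [], d, x, h => h
  | i :: l, d, x, h => by
    refine pvGetDInitConst c l _ x ?_
    rw [PySem.Dict.getD_insert]
    split <;> simp [h]

theorem pvSetContainsIff {α : Type} [BEq α] [LawfulBEq α] (s : PySem.Set α) (x : α) :
    s.contains x = true ↔ x ∈ s := by
  simp [PySem.Set.contains]

-- the zeroing pass does not touch keys not in the item list
theorem pvZeroPassNotMem (k : Int) : ∀ (l : List (String × Int)) (d : PySem.Dict String Int) (x : String),
    x ∉ l.map Prod.fst →
    (l.foldl (fun d p => if p.2 < k then d.insert p.1 (0 : Int) else d) d).getD x 0 = d.getD x 0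
  | [], d, x, _ => rfl
  | p :: l, d, x, h => by
    simp only [List.map_cons, List.mem_cons, not_or] at h
    simp only [List.foldl_cons]
    rw [pvZeroPassNotMem k l _ x h.2]
    split
    · rw [PySem.Dict.getD_insert, if_neg h.1]
    · rfl

-- `for id, acc in acc_rep.items(): if acc < k: acc_rep[id] = False` pointwise
theorem pvZeroPassGetD (k : Int) : ∀ (l : List (String × Int)) (d : PySem.Dict String Int) (x : String),
    (l.map Prod.fst).Nodup → (∀ p ∈ l, d.getD p.1 0 = p.2) →
    (x ∈ l.map Prod.fst ∨ d.getD x 0 = 0) →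
    (l.foldl (fun d p => if p.2 < k then d.insert p.1 (0 : Int) else d) d).getD x 0
      = if d.getD x 0 < k then 0 else d.getD x 0
  | [], d, x, _, _, hx => by
    rcases hx with hx | hx
    · simp at hx
    · simp [hx]
  | p :: l, d, x, hnd, hv, hx => by
    simp only [List.map_cons, List.nodup_cons] at hnd
    simp only [List.foldl_cons]
    by_cases hxp : x = p.1
    · have hxl : x ∉ l.map Prod.fst := hxp ▸ hnd.1
      have hd : d.getD x 0 = p.2 := by rw [hxp]; exact hv p (by simp)
      rw [pvZeroPassNotMem k l _ x hxl]
      split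
      next hk => rw [PySem.Dict.getD_insert, if_pos hxp, hd, if_pos hk]
      next hk => rw [hd, if_neg hk]
    · have hval : ∀ q ∈ l, (if p.2 < k then d.insert p.1 (0 : Int) else d).getD q.1 0 = q.2 := by
        intro q hq
        have hqp : q.1 ≠ p.1 := fun he => hnd.1 (he ▸ List.mem_map_of_mem hq)
        split
        · rw [PySem.Dict.getD_insert, if_neg hqp]; exact hv q (List.mem_cons_of_mem _ hq)
        · exact hv q (List.mem_cons_of_mem _ hq)
      have hgd : (if p.2 < k then d.insert p.1 (0 : Int) else d).getD x 0 = d.getD x 0 := by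
        split
        · rw [PySem.Dict.getD_insert, if_neg hxp]
        · rfl
      rw [pvZeroPassGetD k l _ x hnd.2 hval ?_, hgd]
      rcases hx with hx | hx
      · left; simpa [hxp] using hx
      · right; rw [hgd, hx]

-- the main loop invariant: A's (rep_docs, acc_rep) state is determined by the deduped pair list
theorem pvMainInv : ∀ (report : List String)
    (docs : PySem.Dict String (PySem.Set String)) (acc : PySem.Dict String Int)
    (P : PySem.Set (String × String)),
    (∀ id, docs.getD id PySem.Set.empty = (P.filter (fun p => p.1 == id)).map (·.2)) →
    (∀ r, acc.getD r 0 = ((P.filter (fun p => p.2 == r)).length : Int)) →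
    acc.keys.Nodup →
    (∀ id, (report.foldl (fun st rep =>
        match pySplit2 rep with
        | some (sender, receiver) =>
          if (st.1.getD sender PySem.Set.empty).contains receiver then st
          else (st.1.insert sender (PySem.Set.add (st.1.getD sender PySem.Set.empty) receiver),
                st.2.modify receiver 0 (· + 1))
        | none => st) (docs, acc)).1.getD id PySem.Set.empty
      = ((report.foldl (fun P rep =>
          match pySplit2 rep with
          | some p => PySem.Set.add P p
          | none => P) P).filter (fun p => p.1 == id)).map (·.2)) ∧
    (∀ r, (report.foldl (fun st rep =>
        match pySplit2 rep with
        | some (sender, receiver) =>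
          if (st.1.getD sender PySem.Set.empty).contains receiver then st
          else (st.1.insert sender (PySem.Set.add (st.1.getD sender PySem.Set.empty) receiver),
                st.2.modify receiver 0 (· + 1))
        | none => st) (docs, acc)).2.getD r 0
      = (((report.foldl (fun P rep =>
          match pySplit2 rep with
          | some p => PySem.Set.add P p
          | none => P) P).filter (fun p => p.2 == r)).length : Int)) ∧
    (report.foldl (fun st rep =>
        match pySplit2 rep with
        | some (sender, receiver) =>
          if (st.1.getD sender PySem.Set.empty).contains receiver then st
          else (st.1.insert sender (PySem.Set.add (st.1.getD sender PySem.Set.empty) receiver),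
                st.2.modify receiver 0 (· + 1))
        | none => st) (docs, acc)).2.keys.Nodup
  | [], docs, acc, P, hdocs, hacc, hnd => ⟨hdocs, hacc, hnd⟩
  | rep :: report, docs, acc, P, hdocs, hacc, hnd => by
    simp only [List.foldl_cons]
    rcases hsp : pySplit2 rep with _ | ⟨s, r⟩
    · exact pvMainInv report docs acc P hdocs hacc hnd
    · simp only []
      by_cases hmem : (s, r) ∈ P
      · have hc : (docs.getD s PySem.Set.empty).contains r = true := by
          rw [pvSetContainsIff, hdocs s]
          exact List.mem_map_of_mem (List.mem_filter.mpr ⟨hmem, by simp⟩)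
        rw [if_pos hc]
        have hPadd : PySem.Set.add P (s, r) = P := by
          simp [PySem.Set.add, hmem]
        rw [hPadd]
        exact pvMainInv report docs acc P hdocs hacc hnd
      · have hc : (docs.getD s PySem.Set.empty).contains r = false := by
          rw [Bool.eq_false_iff, Ne, pvSetContainsIff, hdocs s]
          intro hr
          rcases List.mem_map.mp hr with ⟨q, hq, hq2⟩
          rcases List.mem_filter.mp hq with ⟨hqP, hq1⟩
          apply hmem
          have : q = (s, r) := Prod.ext (by simpa using hq1) hq2
          exact this ▸ hqP
        rw [hc]
        simp only [Bool.false_eq_true, if_false]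
        have hPadd : PySem.Set.add P (s, r) = P ++ [(s, r)] := by
          simp [PySem.Set.add, hmem]
        rw [hPadd]
        refine pvMainInv report _ _ _ ?_ ?_ ?_
        · intro id
          rw [PySem.Dict.getD_insert]
          by_cases hid : id = s
          · subst hid
            rw [if_pos rfl, hdocs id]
            have hcf : PySem.Set.contains ((P.filter (fun p => p.1 == id)).map (·.2)) r = false := by
              rw [← hdocs id]; exact hc
            simp only [PySem.Set.add, hcf, Bool.false_eq_true, if_false, List.filter_append]
            simp
          · rw [if_neg hid, hdocs id, List.filter_append]
            simp [Ne.symm hid]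
        · intro x
          rw [PySem.Dict.getD_modify, List.filter_append]
          by_cases hx : x = r
          · rw [if_pos hx, hacc r, hx]
            simp
          · rw [if_neg hx, hacc x]
            have hone : (List.filter (fun p => p.2 == x) [(s, r)]) = [] := by simp [Ne.symm hx]
            rw [hone]
            simp
        · rw [show acc.modify r 0 (· + 1) = [r].foldl (fun d x => d.modify ((fun y => y) x) 0 ((fun _ _ => (· + 1)) d x)) acc from rfl]
          exact PySem.Dict.nodup_keys_foldl_modify_key [r] (fun y => y) 0 _ acc hnd

-- countP splits along a boolean partition of the list
theorem pvCountPSplit {α : Type} (F g : α → Bool) : ∀ (l : List α),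
    l.countP F = (l.filter g).countP F + (l.filter (fun a => !(g a))).countP F
  | [] => by simp
  | a :: t => by
    by_cases h : g a <;>
      simp [List.countP_cons, h, pvCountPSplit F g t] <;> omega

-- the group-extraction loop, pointwise: it adds, for each pair q of S whose receiver's group in
-- S has size ≥ k, one to q's sender
theorem pvAltLoopGetD (k : Int) : ∀ (S : List (String × String)) (d : PySem.Dict String Int) (x : String),
    (solutionAltLoop k S d).getD x 0 = d.getD x 0 +
      ((S.countP (fun q => (q.1 == x) &&
        decide (k ≤ ((S.filter (fun y => y.2 == q.2)).length : Int)))) : Int)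
  | [], d, x => by simp [solutionAltLoop]
  | p :: rest, d, x => by
    rw [solutionAltLoop, pvAltLoopGetD k ((p :: rest).filter (fun q => q.2 != p.2)) _ x]
    have hrunS : (p :: rest).filter (fun q => q.2 == p.2)
        = p :: rest.filter (fun q => q.2 == p.2) := by
      rw [List.filter_cons]; simp
    have hS'S : (p :: rest).filter (fun q => q.2 != p.2)
        = rest.filter (fun q => q.2 != p.2) := by
      rw [List.filter_cons]; simp
    -- every pair of run has receiver p.2; every pair of S' has not
    have hrunRecv : ∀ q ∈ (p :: rest).filter (fun q => q.2 == p.2), q.2 = p.2 := by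
      intro q hq
      simpa using (List.mem_filter.mp hq).2
    have hS'Recv : ∀ q ∈ (p :: rest).filter (fun q => q.2 != p.2), q.2 ≠ p.2 := by
      intro q hq
      simpa using (List.mem_filter.mp hq).2
    -- for q in the run, the group of q.2 in S is the run itself
    have hgrpRun : ∀ q ∈ (p :: rest).filter (fun q => q.2 == p.2),
        (p :: rest).filter (fun y => y.2 == q.2) = (p :: rest).filter (fun q => q.2 == p.2) := by
      intro q hq
      rw [hrunRecv q hq]
    -- for q in S', the group of q.2 has the same size in S and in S'
    have hgrpS' : ∀ q ∈ (p :: rest).filter (fun q => q.2 != p.2),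
        ((p :: rest).filter (fun y => y.2 == q.2)).length
          = (((p :: rest).filter (fun q => q.2 != p.2)).filter (fun y => y.2 == q.2)).length := by
      intro q hq
      have hqne : q.2 ≠ p.2 := hS'Recv q hq
      rw [← List.countP_eq_length_filter, ← List.countP_eq_length_filter, List.countP_filter]
      refine List.countP_congr ?_
      intro y _
      by_cases hy : (y.2 == q.2) = true
      · have hy2 : y.2 = q.2 := by simpa using hy
        simp [hy2, hqne]
      · simp [hy]
    -- split the count over S into the run and S'
    have hsplit : (p :: rest).countP (fun q => (q.1 == x) &&
          decide (k ≤ (((p :: rest).filter (fun y => y.2 == q.2)).length : Int)))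
        = ((p :: rest).filter (fun q => q.2 == p.2)).countP (fun q => (q.1 == x) &&
            decide (k ≤ (((p :: rest).filter (fun y => y.2 == q.2)).length : Int)))
          + ((p :: rest).filter (fun q => q.2 != p.2)).countP (fun q => (q.1 == x) &&
            decide (k ≤ (((p :: rest).filter (fun y => y.2 == q.2)).length : Int))) := by
      rw [pvCountPSplit _ (fun q => q.2 == p.2) (p :: rest)]
      congr 1
    -- on S', replace the group size in S by the group size in S'
    have hcS' : ((p :: rest).filter (fun q => q.2 != p.2)).countP (fun q => (q.1 == x) &&
          decide (k ≤ (((p :: rest).filter (fun y => y.2 == q.2)).length : Int)))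
        = ((p :: rest).filter (fun q => q.2 != p.2)).countP (fun q => (q.1 == x) &&
          decide (k ≤ ((((p :: rest).filter (fun q => q.2 != p.2)).filter (fun y => y.2 == q.2)).length : Int))) := by
      refine List.countP_congr ?_
      intro q hq
      rw [hgrpS' q hq]
    -- on the run, the threshold condition is the constant `k ≤ run.length`
    have hcRun : ((p :: rest).filter (fun q => q.2 == p.2)).countP (fun q => (q.1 == x) &&
          decide (k ≤ (((p :: rest).filter (fun y => y.2 == q.2)).length : Int)))
        = if k ≤ ((((p :: rest).filter (fun q => q.2 == p.2)).length : Nat) : Int) then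
            ((p :: rest).filter (fun q => q.2 == p.2)).countP (fun q => q.1 == x)
          else 0 := by
      by_cases hk : k ≤ ((((p :: rest).filter (fun q => q.2 == p.2)).length : Nat) : Int)
      · rw [if_pos hk]
        refine List.countP_congr ?_
        intro q hq
        rw [hgrpRun q hq, decide_eq_true hk, Bool.and_true]
      · rw [if_neg hk]
        rw [List.countP_eq_zero.mpr ?_]
        intro q hq
        rw [hgrpRun q hq, decide_eq_false hk, Bool.and_false]
        simp
    -- the crediting fold over the run, pointwise
    have hfold : ∀ (l : List (String × String)) (d0 : PySem.Dict String Int),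
        (l.foldl (fun d q => d.modify q.1 0 (· + 1)) d0).getD x 0
          = d0.getD x 0 + (l.countP (fun q => q.1 == x) : Int) := by
      intro l d0
      rw [show l.foldl (fun d q => d.modify q.1 0 (· + 1)) d0
          = (l.map Prod.fst).foldl (fun d y => d.modify y 0 (· + 1)) d0 from
        (List.foldl_map (f := Prod.fst)
          (g := fun (d : PySem.Dict String Int) (y : String) => d.modify y 0 (· + 1))).symm]
      rw [PySem.Dict.getD_foldl_modify_add_one, List.count_eq_countP, List.countP_map]
      simp [Function.comp_def]
    rw [hsplit, hcS', hcRun]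
    by_cases hk : k ≤ ((((p :: rest).filter (fun q => q.2 == p.2)).length : Nat) : Int)
    · rw [if_pos hk, if_pos hk, hfold]
      push_cast
      ring
    · rw [if_neg hk, if_neg hk]
      push_cast
      ring
termination_by S => S.length
decreasing_by
  simpa [List.filter_cons] using Nat.lt_succ_of_le (List.length_filter_le (fun q => q.2 != p.2) rest)

-- ===== VERDICT (by name: the statement is the Claim_ definition above) =====
theorem solution_spec : Claim_equal_solution := by
  intro id_list report k _ _
  unfold Spec_solution solution solution_alt
  simp only []
  -- the shared deduped pair list: B's membership-test fold is A's Set.add fold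
  set P : PySem.Set (String × String) := report.foldl (fun P rep =>
      match pySplit2 rep with
      | some p => PySem.Set.add P p
      | none => P) PySem.Set.empty with hP
  have hPB : report.foldl (fun ps rep =>
      match pySplit2 rep with
      | some p => if p ∈ ps then ps else ps ++ [p]
      | none => ps) ([] : List (String × String)) = P := by
    rw [hP]
    refine congrFun (congrFun (congrArg List.foldl ?_) _) _
    funext ps rep
    rcases pySplit2 rep with _ | p
    · rfl
    · exact (PySem.Set.add_eq_ite ps p).symm
  rw [hPB]
  -- invariant for A's report loop
  obtain ⟨hdocs, hacc, hnd⟩ := pvMainInv report (solutionInitDocs id_list) (solutionInitAcc id_list)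
    PySem.Set.empty
    (fun id => by
      unfold solutionInitDocs
      rw [pvGetDInitConst PySem.Set.empty id_list PySem.Dict.empty id (by simp [PySem.Dict.getD_empty])]
      simp [PySem.Set.empty])
    (fun r => by
      unfold solutionInitAcc
      rw [pvGetDInitConst (0 : Int) id_list PySem.Dict.empty r (by simp [PySem.Dict.getD_empty])]
      simp)
    (by
      unfold solutionInitAcc
      exact PySem.Dict.nodup_keys_foldl_insert id_list (fun _ _ => (0 : Int)) PySem.Dict.empty
        PySem.Dict.nodup_keys_empty)
  -- abbreviations for the final states
  set stA := report.foldl (fun st rep =>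
      match pySplit2 rep with
      | some (sender, receiver) =>
        if (st.1.getD sender PySem.Set.empty).contains receiver then st
        else (st.1.insert sender (PySem.Set.add (st.1.getD sender PySem.Set.empty) receiver),
              st.2.modify receiver 0 (· + 1))
      | none => st) (solutionInitDocs id_list, solutionInitAcc id_list) with hstA
  set accZ := stA.2.items.foldl (fun d p => if p.2 < k then d.insert p.1 (0 : Int) else d) stA.2 with haccZ
  -- the zeroed acc_rep, pointwise
  have hAccZ : ∀ x, accZ.getD x 0 = if stA.2.getD x 0 < k then 0 else stA.2.getD x 0 := by
    intro x
    refine pvZeroPassGetD k stA.2.items stA.2 x hnd ?_ ?_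
    · intro p hp
      exact PySem.Dict.getD_of_mem_items stA.2 (by exact hp) hnd 0
    · by_cases hc : stA.2.contains x = true
      · left; exact (PySem.Dict.contains_iff_mem_keys stA.2 x).mp hc
      · right; exact PySem.Dict.getD_of_not_contains stA.2 0 (by simpa using hc)
  have hinit0 : ∀ r, (id_list.foldl (fun d i => d.insert i (0 : Int)) PySem.Dict.empty).getD r 0 = 0 :=
    fun r => pvGetDInitConst (0 : Int) id_list PySem.Dict.empty r (by simp [PySem.Dict.getD_empty])
  -- assemble
  rw [PySem.List.foldl_append_singleton_eq_map, List.nil_append]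
  refine List.map_congr_left ?_
  intro id _
  rw [hdocs id, pvAltLoopGetD k P _ id, hinit0 id]
  rw [PySem.List.foldl_ite_add_one (fun r => accZ.getD r 0 ≠ 0)
      ((P.filter (fun p => p.1 == id)).map (·.2)) 0]
  rw [zero_add, zero_add, List.countP_map, List.countP_filter]
  refine congrArg (fun n : Nat => (n : Int)) (List.countP_congr ?_)
  intro p hp
  have hcnt1 : 1 ≤ (P.filter (fun q => q.2 == p.2)).length :=
    List.length_pos_of_mem (List.mem_filter.mpr ⟨hp, by simp⟩)
  have hcntA : stA.2.getD p.2 0 = ((P.filter (fun q => q.2 == p.2)).length : Int) := hacc p.2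
  have hzp : (decide (accZ.getD p.2 0 ≠ 0))
      = decide (k ≤ ((P.filter (fun q => q.2 == p.2)).length : Int)) := by
    rw [hAccZ p.2, hcntA]
    by_cases hk : k ≤ ((P.filter (fun q => q.2 == p.2)).length : Int)
    · rw [if_neg (by omega), decide_eq_true hk, decide_eq_true (by omega)]
    · rw [if_pos (by omega), decide_eq_false hk, decide_eq_false (by omega)]
  rw [show (P.filter (fun y => y.2 == p.2)) = (P.filter (fun q => q.2 == p.2)) from rfl]
  rw [Function.comp_def]
  constructor
  · intro h
    have h1 : decide (accZ.getD p.2 0 ≠ 0) = true := Bool.and_elim_left h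
    have h2 : (p.1 == id) = true := Bool.and_elim_right h
    rw [hzp] at h1
    exact Bool.and_intro h2 h1
  · intro h
    have h2 : (p.1 == id) = true := Bool.and_elim_left h
    have h1 : decide (k ≤ ((P.filter (fun q => q.2 == p.2)).length : Int)) = true := Bool.and_elim_right h
    rw [← hzp] at h1
    exact Bool.and_intro h1 h2
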